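-- pv_equiv track=rewrite | github.com/decoherer/lithomap | geometry.py | cropped
-- ===== SOURCE A (Python) =====
-- def isinsideboundingbox(x,y,bb):
--     return bb[0]<x<bb[0]+bb[2] and bb[1]<y<bb[1]+bb[3]
--
-- def cropped(c,bb):
--     cs,ci = [],[]
--     for p in c:
--         if isinsideboundingbox(*p,bb):
--             ci.append(p)
--         else:
--             if len(ci):
--                 cs.append(ci)
--             ci = []
--     if len(ci):
--         cs.append(ci)
--     # return cs
--     return [c for c in cs if 1<len(c)]
-- ===== SOURCE B (Python) =====
-- def cropped(c, bb):
--     def inside(p):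
--         return bb[0] < p[0] < bb[0] + bb[2] and bb[1] < p[1] < bb[1] + bb[3]
--     segs = []
--     i, n = 0, len(c)
--     while i < n:
--         if inside(c[i]):
--             j = i
--             while j < n and inside(c[j]):
--                 j += 1
--             if j - i > 1:
--                 segs.append(c[i:j])
--             i = j
--         else:
--             i += 1
--     return segs
-- ===== Notes on version B (the rewrite author's own statement) =====
-- stated objective: alternative
-- what changed: Replaces the accumulator/flush state machine with a two-pointer scan: at each inside point it advances a second index over the whole maximal inside run, slices it out, and keeps it only if longer than 1.
import Mathlib
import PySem

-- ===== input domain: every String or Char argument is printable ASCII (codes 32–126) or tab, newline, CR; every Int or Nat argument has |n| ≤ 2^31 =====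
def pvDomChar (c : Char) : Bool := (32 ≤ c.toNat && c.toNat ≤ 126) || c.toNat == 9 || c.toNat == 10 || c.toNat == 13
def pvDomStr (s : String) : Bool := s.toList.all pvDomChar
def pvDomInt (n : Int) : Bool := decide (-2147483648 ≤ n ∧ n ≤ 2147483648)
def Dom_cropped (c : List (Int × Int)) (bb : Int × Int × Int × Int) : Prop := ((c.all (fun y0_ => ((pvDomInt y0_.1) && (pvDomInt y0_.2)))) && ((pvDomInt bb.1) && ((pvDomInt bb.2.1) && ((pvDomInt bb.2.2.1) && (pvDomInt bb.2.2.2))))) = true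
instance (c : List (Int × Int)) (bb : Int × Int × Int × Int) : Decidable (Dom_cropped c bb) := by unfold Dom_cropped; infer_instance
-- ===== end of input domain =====

-- B replaces A's accumulator/flush state machine by a two-pointer scan that slices out each maximal inside run; same return value (alternative decomposition, no speed claim).


-- ===== PORT A =====
def isinsideboundingbox (x y : Int) (bb : Int × Int × Int × Int) : Bool :=
  decide (bb.1 < x ∧ x < bb.1 + bb.2.2.1 ∧ bb.2.1 < y ∧ y < bb.2.1 + bb.2.2.2)

def cropped (c : List (Int × Int)) (bb : Int × Int × Int × Int) : List (List (Int × Int)) :=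
  let st := c.foldl (fun (st : List (List (Int × Int)) × List (Int × Int)) p =>
      if isinsideboundingbox p.1 p.2 bb then (st.1, st.2 ++ [p])
      else if st.2.length ≠ 0 then (st.1 ++ [st.2], ([] : List (Int × Int)))
      else (st.1, ([] : List (Int × Int)))) ([], [])
  let cs := if st.2.length ≠ 0 then st.1 ++ [st.2] else st.1
  cs.filter (fun s => decide (1 < s.length))

-- ===== PORT B =====
-- the inner 'while j < n and inside(c[j])' advance is the takeWhile/dropWhile split of the suffix
def cropped_alt (c : List (Int × Int)) (bb : Int × Int × Int × Int) : List (List (Int × Int)) :=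
  match c with
  | [] => []
  | p :: rest =>
    if h : isinsideboundingbox p.1 p.2 bb = true then
      let run := List.takeWhile (fun q => isinsideboundingbox q.1 q.2 bb) (p :: rest)
      let rest' := List.dropWhile (fun q => isinsideboundingbox q.1 q.2 bb) (p :: rest)
      (if 1 < run.length then [run] else []) ++ cropped_alt rest' bb
    else cropped_alt rest bb
termination_by c.length
decreasing_by
  · simp only [List.dropWhile, h]
    exact Nat.lt_succ_of_le (List.length_dropWhile_le _ _)
  · simp

-- ===== PRECONDITION & SPEC =====
def Spec_cropped (c : List (Int × Int)) (bb : Int × Int × Int × Int) (out : List (List (Int × Int))) : Prop := out = cropped_alt c bb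
instance (c : List (Int × Int)) (bb : Int × Int × Int × Int) (out : List (List (Int × Int))) : Decidable (Spec_cropped c bb out) := by unfold Spec_cropped; infer_instance

-- ===== CLAIM (what is proved, stated in full; the proofs are below) =====
def Claim_equal_cropped : Prop := ∀ (c : List (Int × Int)) (bb : Int × Int × Int × Int), Dom_cropped c bb → Spec_cropped c bb (cropped c bb)

-- ===== LEMMAS AND PROOFS =====

-- intermediate form: B's value with a pending run `ci`
def goAux (bb : Int × Int × Int × Int) (ci : List (Int × Int)) : List (Int × Int) → List (List (Int × Int))
  | [] => if 1 < ci.length then [ci] else []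
  | p :: rest =>
    if isinsideboundingbox p.1 p.2 bb then goAux bb (ci ++ [p]) rest
    else (if 1 < ci.length then [ci] else []) ++ goAux bb [] rest

-- A's fold with any accumulator, finished and filtered, equals the filtered accumulator plus goAux
theorem foldl_eq_goAux (bb : Int × Int × Int × Int) (c : List (Int × Int))
    (cs : List (List (Int × Int))) (ci : List (Int × Int)) :
    (let st := c.foldl (fun (st : List (List (Int × Int)) × List (Int × Int)) p =>
        if isinsideboundingbox p.1 p.2 bb then (st.1, st.2 ++ [p])
        else if st.2.length ≠ 0 then (st.1 ++ [st.2], ([] : List (Int × Int)))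
        else (st.1, ([] : List (Int × Int)))) (cs, ci)
     (if st.2.length ≠ 0 then st.1 ++ [st.2] else st.1).filter (fun s => decide (1 < s.length)))
      = cs.filter (fun s => decide (1 < s.length)) ++ goAux bb ci c := by
  induction c generalizing cs ci with
  | nil =>
    simp only [List.foldl_nil, goAux]
    by_cases h : ci.length ≠ 0
    · simp only [if_pos h, List.filter_append, List.filter]
      have : ci ≠ [] := by intro e; simp [e] at h
      by_cases h2 : 1 < ci.length <;> simp [h2]
    · have : ci = [] := List.eq_nil_of_length_eq_zero (by omega)
      simp [this]
  | cons p t ih =>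
    simp only [List.foldl_cons]
    by_cases hp : isinsideboundingbox p.1 p.2 bb
    · simp only [if_pos hp, goAux, ih]
    · simp only [if_neg hp, goAux]
      by_cases h : ci.length ≠ 0
      · simp only [if_pos h, ih, List.filter_append, List.filter]
        by_cases h2 : 1 < ci.length <;> simp [h2, List.append_assoc]
      · have hci : ci = [] := List.eq_nil_of_length_eq_zero (by omega)
        simpa [hci] using ih cs []

-- goAux with nonempty-irrelevant pending run matches the takeWhile/dropWhile split
theorem goAux_split (bb : Int × Int × Int × Int) (c : List (Int × Int)) (ci : List (Int × Int)) :
    goAux bb ci c =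
      (if 1 < (ci ++ c.takeWhile (fun q => isinsideboundingbox q.1 q.2 bb)).length
       then [ci ++ c.takeWhile (fun q => isinsideboundingbox q.1 q.2 bb)] else [])
      ++ goAux bb [] (c.dropWhile (fun q => isinsideboundingbox q.1 q.2 bb)) := by
  induction c generalizing ci with
  | nil => simp [goAux]
  | cons p t ih =>
    by_cases hp : isinsideboundingbox p.1 p.2 bb
    · simp only [goAux, List.takeWhile, List.dropWhile, hp, ih (ci ++ [p])]
      simp [List.append_assoc]
    · simp only [goAux, List.takeWhile, List.dropWhile, hp]
      simp only [Bool.false_eq_true]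
      have h0 : goAux bb [] (p :: t) = goAux bb [] t := by
        simp [goAux, hp]
      simp

theorem goAux_eq_alt (bb : Int × Int × Int × Int) (c : List (Int × Int)) :
    goAux bb [] c = cropped_alt c bb := by
  induction hn : c.length using Nat.strong_induction_on generalizing c with
  | _ n ih =>
    match c with
    | [] => simp [goAux, cropped_alt]
    | p :: t =>
      by_cases hp : isinsideboundingbox p.1 p.2 bb
      · rw [cropped_alt]
        simp only [dif_pos hp]
        have hsplit := goAux_split bb (p :: t) []
        simp only [List.nil_append] at hsplit
        rw [hsplit]
        congr 1
        have hd : (List.dropWhile (fun q => isinsideboundingbox q.1 q.2 bb) (p :: t)) =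
            List.dropWhile (fun q => isinsideboundingbox q.1 q.2 bb) t := by
          simp [List.dropWhile, hp]
        rw [hd] at *
        exact ih _ (by subst hn; exact Nat.lt_succ_of_le (List.length_dropWhile_le _ _)) _ rfl
      · rw [cropped_alt]
        simp only [dif_neg hp]
        have h0 : goAux bb [] (p :: t) = goAux bb [] t := by simp [goAux, hp]
        rw [h0]
        exact ih t.length (by subst hn; simp) t rfl

-- ===== VERDICT (by name: the statement is the Claim_ definition above) =====
theorem cropped_spec : Claim_equal_cropped := by
  intro c bb _
  show cropped c bb = cropped_alt c bb
  have h := foldl_eq_goAux bb c [] []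
  simp only [List.filter, List.nil_append] at h
  rw [cropped, h, goAux_eq_alt]
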